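-- pv_equiv track=rewrite | github.com/OTOYO1020/ChatDev_Intermediate | WareHouse/DD_291__20250518051413/card_flip.py | count_valid_flips
-- ===== SOURCE A (Python) =====
-- from typing import List
--
-- def count_valid_flips(N: int, A: List[int], B: List[int]) -> int:
--     mod = 998244353
--     valid_count = 0
--     # Handle the edge case when N is 1
--     if N == 1:
--         return 0 if A[0] == B[0] else 1
--     # Iterate through all possible subsets of cards using bitmask
--     for mask in range(1 << N):
--         valid = True
--         for i in range(N):
--             current_flipped = (mask & (1 << i)) != 0
--             if i < N - 1:  # Check adjacent cards only if not the last card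
--                 next_flipped = (mask & (1 << (i + 1))) != 0
--                 # Check conditions for valid configurations
--                 if current_flipped and next_flipped:
--                     if B[i] == B[i + 1]:
--                         valid = False
--                         break
--                 elif not current_flipped and not next_flipped:
--                     if A[i] == A[i + 1]:
--                         valid = False
--                         break
--                 elif current_flipped and not next_flipped:
--                     if B[i] == A[i + 1]:
--                         valid = False
--                         break
--                 elif not current_flipped and next_flipped:
--                     if A[i] == B[i + 1]:
--                         valid = False
--                         break
--         # Check the last card with the previous card
--         if valid and N > 1:
--             last_flipped = (mask & (1 << (N - 1))) != 0
--             second_last_flipped = (mask & (1 << (N - 2))) != 0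
--             if last_flipped and not second_last_flipped:  # Last card flipped, previous not
--                 if B[N - 1] == A[N - 2]:
--                     valid = False
--             elif not last_flipped and second_last_flipped:  # Last card not flipped, previous flipped
--                 if A[N - 1] == B[N - 2]:
--                     valid = False
--         if valid:
--             valid_count = (valid_count + 1) % mod
--     return valid_count
-- ===== SOURCE B (Python) =====
-- from typing import List
--
-- def count_valid_flips(N: int, A: List[int], B: List[int]) -> int:
--     # Linear DP: for each prefix, count assignments ending with card i showing A[i] (ca)
--     # or showing B[i] (cb), extending only when adjacent shown values differ.
--     mod = 998244353
--     if N == 0: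
--         return 1
--     ca, cb = 1, 1
--     for i in range(1, N):
--         na = (ca if A[i] != A[i - 1] else 0) + (cb if A[i] != B[i - 1] else 0)
--         nb = (ca if B[i] != A[i - 1] else 0) + (cb if B[i] != B[i - 1] else 0)
--         ca, cb = na, nb
--     return (ca + cb) % mod
-- ===== Notes on version B (the rewrite author's own statement) =====
-- stated objective: faster
-- what changed: Replaced A's enumeration of all 2^N flip masks (checking every adjacent pair per mask) by a linear DP that keeps, per card, the counts of valid prefixes whose last card shows A[i] or B[i].
-- intended difference: For N == 1 A returns 0 if A[0]==B[0] else 1, but with a single card both flip assignments are trivially valid (there are no adjacent pairs), so B returns 2, the intended count. — e.g. on count_valid_flips(1, [3], [3]): A returns 0, B returns 2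
import Mathlib
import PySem

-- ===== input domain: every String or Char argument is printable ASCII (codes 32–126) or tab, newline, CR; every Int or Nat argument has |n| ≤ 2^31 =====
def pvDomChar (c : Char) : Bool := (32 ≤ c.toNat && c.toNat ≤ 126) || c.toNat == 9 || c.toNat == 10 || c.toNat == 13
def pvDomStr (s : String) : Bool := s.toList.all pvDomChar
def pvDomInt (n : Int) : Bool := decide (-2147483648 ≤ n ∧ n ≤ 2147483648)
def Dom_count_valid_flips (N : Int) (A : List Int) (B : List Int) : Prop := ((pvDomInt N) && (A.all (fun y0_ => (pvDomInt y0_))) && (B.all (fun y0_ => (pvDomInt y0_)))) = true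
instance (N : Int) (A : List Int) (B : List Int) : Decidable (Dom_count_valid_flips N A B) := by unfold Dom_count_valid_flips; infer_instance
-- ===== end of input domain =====

-- B replaces A's O(2^N·N) brute-force mask enumeration by a linear DP over the cards;
-- for N = 1 (see D_ below) B returns 2, the intended count, where A returns 0 or 1.

-- ===== PORT A =====
-- Python masks are non-negative ints, so the mask loop is ported over Nat with
-- Nat.testBit for `(mask & (1 << i)) != 0`; list indexing A[i] is `List.getD`
-- (exact for the in-range indices Pre_ guarantees; Python raises out of range).
def aPairOk (n : Nat) (A B : List Int) (mask : Nat) (i : Nat) : Bool :=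
  if i < n - 1 then
    let cf := mask.testBit i
    let nf := mask.testBit (i+1)
    if cf && nf then !(B.getD i 0 == B.getD (i+1) 0)
    else if !cf && !nf then !(A.getD i 0 == A.getD (i+1) 0)
    else if cf && !nf then !(B.getD i 0 == A.getD (i+1) 0)
    else !(A.getD i 0 == B.getD (i+1) 0)
  else true

def aLastOk (n : Nat) (A B : List Int) (mask : Nat) : Bool :=
  let lf := mask.testBit (n-1)
  let slf := mask.testBit (n-2)
  if lf && !slf then !(B.getD (n-1) 0 == A.getD (n-2) 0)
  else if !lf && slf then !(A.getD (n-1) 0 == B.getD (n-2) 0)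
  else true

-- one iteration of A's mask loop (inner pair loop, then the redundant last-pair check)
def aBody (N : Int) (A B : List Int) (vc : Int) (mask : Nat) : Int :=
  let valid := (List.range N.toNat).all (aPairOk N.toNat A B mask)
  let valid := valid && (if 1 < N then aLastOk N.toNat A B mask else true)
  if valid then (vc + 1) % 998244353 else vc

def count_valid_flips (N : Int) (A : List Int) (B : List Int) : Int :=
  if N = 1 then (if A.getD 0 0 == B.getD 0 0 then 0 else 1)
  else
    (List.range (2 ^ N.toNat)).foldl (aBody N A B) 0

-- ===== PORT B =====
def count_valid_flips_alt (N : Int) (A : List Int) (B : List Int) : Int :=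
  if N = 0 then 1
  else
    let s := (List.range' 1 (N.toNat - 1)).foldl (fun (s : Int × Int) i =>
      ((if A.getD i 0 ≠ A.getD (i-1) 0 then s.1 else 0) +
         (if A.getD i 0 ≠ B.getD (i-1) 0 then s.2 else 0),
       (if B.getD i 0 ≠ A.getD (i-1) 0 then s.1 else 0) +
         (if B.getD i 0 ≠ B.getD (i-1) 0 then s.2 else 0))) (1, 1)
    (s.1 + s.2) % 998244353

-- ===== PRECONDITION & SPEC =====
-- Python A raises ValueError on N < 0 (negative shift in `range(1 << N)`) and
-- IndexError when a list is shorter than N; Pre_ excludes exactly those inputs.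
def Pre_count_valid_flips (N : Int) (A : List Int) (B : List Int) : Prop :=
  0 ≤ N ∧ N.toNat ≤ A.length ∧ N.toNat ≤ B.length
instance (N : Int) (A : List Int) (B : List Int) : Decidable (Pre_count_valid_flips N A B) := by
  unfold Pre_count_valid_flips; infer_instance

def pvWitness_count_valid_flips : Int × List Int × List Int := (3, [1, 2, 1], [2, 1, 2])

-- For N == 1 A returns 0 if A[0]==B[0] else 1, but with a single card both flip
-- assignments are trivially valid (no adjacent pairs exist), so B returns 2, the intended count.
def D_count_valid_flips (N : Int) (A : List Int) (B : List Int) : Prop := N = 1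
instance (N : Int) (A : List Int) (B : List Int) : Decidable (D_count_valid_flips N A B) := by
  unfold D_count_valid_flips; infer_instance

def Spec_count_valid_flips (N : Int) (A : List Int) (B : List Int) (out : Int) : Prop :=
  ¬ D_count_valid_flips N A B → out = count_valid_flips_alt N A B
instance (N : Int) (A : List Int) (B : List Int) (out : Int) : Decidable (Spec_count_valid_flips N A B out) := by
  unfold Spec_count_valid_flips; infer_instance

def pvDiffWitness_count_valid_flips : Int × List Int × List Int := (1, [3], [3])
def pvDiffWitnessOut_count_valid_flips : Int × Int := (0, 2)

-- ===== CLAIM (what is proved, stated in full; the proofs are below) =====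
def Claim_unchanged_count_valid_flips : Prop := ∀ (N : Int) (A : List Int) (B : List Int), Dom_count_valid_flips N A B → Pre_count_valid_flips N A B → Spec_count_valid_flips N A B (count_valid_flips N A B)
def Claim_changed_count_valid_flips : Prop := Dom_count_valid_flips (pvDiffWitness_count_valid_flips.1) (pvDiffWitness_count_valid_flips.2.1) (pvDiffWitness_count_valid_flips.2.2) ∧ Pre_count_valid_flips (pvDiffWitness_count_valid_flips.1) (pvDiffWitness_count_valid_flips.2.1) (pvDiffWitness_count_valid_flips.2.2) ∧ D_count_valid_flips (pvDiffWitness_count_valid_flips.1) (pvDiffWitness_count_valid_flips.2.1) (pvDiffWitness_count_valid_flips.2.2) ∧ count_valid_flips (pvDiffWitness_count_valid_flips.1) (pvDiffWitness_count_valid_flips.2.1) (pvDiffWitness_count_valid_flips.2.2) = pvDiffWitnessOut_count_valid_flips.1 ∧ count_valid_flips_alt (pvDiffWitness_count_valid_flips.1) (pvDiffWitness_count_valid_flips.2.1) (pvDiffWitness_count_valid_flips.2.2) = pvDiffWitnessOut_count_valid_flips.2 ∧ pvDiffWitnessOut_count_valid_flips.1 ≠ pvDiffWitnessOut_count_vali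d_flips.2
def Claim_exact_count_valid_flips : Prop := ∀ (N : Int) (A : List Int) (B : List Int), Dom_count_valid_flips N A B → Pre_count_valid_flips N A B → D_count_valid_flips N A B → count_valid_flips N A B ≠ count_valid_flips_alt N A B

-- ===== LEMMAS AND PROOFS =====

-- the value card i shows under flip mask m
def shown (A B : List Int) (m : Nat) (i : Nat) : Int :=
  if m.testBit i then B.getD i 0 else A.getD i 0

-- mask m is valid for the first n cards: all adjacent shown values differ
def validC (A B : List Int) (n : Nat) (m : Nat) : Bool :=
  (List.range (n-1)).all (fun i => !(shown A B m i == shown A B m (i+1)))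

-- number of valid masks on n cards whose top bit (bit n-1) equals b
def cnt (A B : List Int) (b : Bool) (n : Nat) : Nat :=
  ((List.range (2^n)).filter (fun m => validC A B n m && (m.testBit (n-1) == b))).length

theorem aPairOk_eq (n : Nat) (A B : List Int) (m i : Nat) (h : i < n - 1) :
    aPairOk n A B m i = !(shown A B m i == shown A B m (i+1)) := by
  simp only [aPairOk, if_pos h, shown]
  cases h1 : m.testBit i <;> cases h2 : m.testBit (i+1) <;> simp

theorem all_aPairOk_eq (n : Nat) (A B : List Int) (m : Nat) :
    (List.range n).all (aPairOk n A B m) = validC A B n m := by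
  unfold validC
  rw [Bool.eq_iff_iff]
  simp only [List.all_eq_true, List.mem_range]
  constructor
  · intro h i hi
    have := h i (by omega)
    rwa [aPairOk_eq n A B m i hi] at this
  · intro h i hi
    by_cases hc : i < n - 1
    · rw [aPairOk_eq n A B m i hc]; exact h i hc
    · simp [aPairOk, hc]

theorem aLastOk_of_validC (n : Nat) (hn : 2 ≤ n) (A B : List Int) (m : Nat)
    (h : validC A B n m = true) : aLastOk n A B m = true := by
  unfold validC at h
  simp only [List.all_eq_true, List.mem_range] at h
  have hp := h (n-2) (by omega)
  have he : n - 2 + 1 = n - 1 := by omega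
  rw [he] at hp
  simp only [Bool.not_eq_eq_eq_not, Bool.not_true, beq_eq_false_iff_ne, ne_eq] at hp
  unfold aLastOk
  simp only [shown] at hp
  cases h1 : m.testBit (n-1) <;> cases h2 : m.testBit (n-2) <;>
    simp only [h1, h2] at hp ⊢ <;> simp_all <;> omega

theorem foldl_count (ok : Nat → Bool) (l : List Nat) : ∀ (c : Int),
    l.foldl (fun vc m => if ok m then (vc + 1) % 998244353 else vc) (c % 998244353)
      = (c + ((l.filter ok).length : Int)) % 998244353 := by
  induction l with
  | nil => intro c; simp
  | cons a t ih =>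
    intro c
    cases h : ok a
    · rw [List.filter_cons_of_neg (by simp [h])]
      simp only [List.foldl_cons, h, Bool.false_eq_true, if_false]
      exact ih c
    · rw [List.filter_cons_of_pos (by simp [h])]
      simp only [List.foldl_cons, h, if_true]
      have h1 : (c % 998244353 + 1) % 998244353 = (c + 1) % 998244353 := by
        conv_rhs => rw [Int.add_emod]
        norm_num
      rw [h1, ih (c + 1)]
      congr 1
      rw [List.length_cons]
      push_cast
      ring

theorem filter_split (P q : Nat → Bool) (l : List Nat) :
    (l.filter P).length
      = (l.filter (fun m => P m && (q m == false))).length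
        + (l.filter (fun m => P m && (q m == true))).length := by
  induction l with
  | nil => simp
  | cons a t ih =>
    cases hP : P a <;> cases hq : q a <;>
      simp [hP, hq, ih] <;> omega

theorem length_filter_map' (f : Nat → Nat) (p : Nat → Bool) (l : List Nat) :
    ((l.map f).filter p).length = (l.filter (fun x => p (f x))).length := by
  rw [List.filter_map]
  rw [List.length_map]
  rfl

theorem validC_succ (A B : List Int) (n : Nat) (hn : 1 ≤ n) (m : Nat) :
    validC A B (n+1) m = (validC A B n m && !(shown A B m (n-1) == shown A B m n)) := by
  unfold validC
  have h : (n+1) - 1 = (n-1) + 1 := by omega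
  rw [h, List.range_succ, List.all_append]
  have h2 : n - 1 + 1 = n := by omega
  simp [h2]

theorem shown_lt (A B : List Int) (n m : Nat) (hm : m < 2^n) :
    shown A B m n = A.getD n 0 := by
  simp [shown, Nat.testBit_eq_false_of_lt hm]

theorem shown_add_eq (A B : List Int) (n m : Nat) (hm : m < 2^n) :
    shown A B (2^n + m) n = B.getD n 0 := by
  simp [shown, Nat.testBit_two_pow_add_eq, Nat.testBit_eq_false_of_lt hm]

theorem shown_add_lt (A B : List Int) (n i : Nat) (h : i < n) (m : Nat) :
    shown A B (2^n + m) i = shown A B m i := by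
  simp [shown, Nat.testBit_two_pow_add_gt h]

theorem validC_add (A B : List Int) (n m : Nat) :
    validC A B n (2^n + m) = validC A B n m := by
  unfold validC
  rw [Bool.eq_iff_iff]
  simp only [List.all_eq_true, List.mem_range]
  constructor <;> intro h i hi <;>
    have := h i hi <;>
    rwa [shown_add_lt A B n i (by omega) m, shown_add_lt A B n (i+1) (by omega) m] at *

-- number of valid masks on n+1 cards with top bit b, counted from the n-card counts
theorem sub_count (A B : List Int) (n : Nat) (v : Int) (b' : Bool) :
    ((List.range (2^n)).filter (fun m =>
        validC A B n m && !(shown A B m (n-1) == v) && (m.testBit (n-1) == b'))).length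
      = if v = (if b' then B.getD (n-1) 0 else A.getD (n-1) 0) then 0 else cnt A B b' n := by
  by_cases hv : v = (if b' then B.getD (n-1) 0 else A.getD (n-1) 0)
  · rw [if_pos hv]
    rw [List.length_eq_zero_iff, List.filter_eq_nil_iff]
    intro m _ h
    simp only [Bool.and_eq_true, Bool.not_eq_eq_eq_not, Bool.not_true,
      beq_eq_false_iff_ne, beq_iff_eq] at h
    obtain ⟨⟨hvc, hne⟩, hbit⟩ := h
    apply hne
    rw [shown, hbit]
    cases b' <;> simpa using hv.symm
  · rw [if_neg hv]
    unfold cnt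
    congr 1
    apply List.filter_congr
    intro m _
    cases b' <;> cases hb : m.testBit (n-1) <;>
      simp_all [shown, beq_eq_false_iff_ne] <;>
      exact fun _ h => hv h.symm

theorem cnt_succ (A B : List Int) (n : Nat) (hn : 1 ≤ n) (b : Bool) :
    cnt A B b (n+1)
      = (if (if b then B.getD n 0 else A.getD n 0) = A.getD (n-1) 0 then 0 else cnt A B false n)
        + (if (if b then B.getD n 0 else A.getD n 0) = B.getD (n-1) 0 then 0 else cnt A B true n) := by
  have e : 2^(n+1) = 2^n + 2^n := by rw [pow_succ]; omega
  conv_lhs => rw [cnt]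
  rw [e, List.range_add, List.filter_append, List.length_append, length_filter_map']
  have hfirst : (List.range (2^n)).filter
      (fun m => validC A B (n+1) m && (m.testBit (n+1-1) == b))
      = (List.range (2^n)).filter
      (fun m => (validC A B n m && !(shown A B m (n-1) == A.getD n 0)) && (false == b)) := by
    apply List.filter_congr
    intro m hm
    rw [List.mem_range] at hm
    rw [Nat.add_sub_cancel, validC_succ A B n hn m, shown_lt A B n m hm,
      Nat.testBit_eq_false_of_lt hm]
  have hsecond : (List.range (2^n)).filter
      (fun m => validC A B (n+1) (2^n + m) && ((2^n + m).testBit (n+1-1) == b))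
      = (List.range (2^n)).filter
      (fun m => (validC A B n m && !(shown A B m (n-1) == B.getD n 0)) && (true == b)) := by
    apply List.filter_congr
    intro m hm
    rw [List.mem_range] at hm
    rw [Nat.add_sub_cancel, validC_succ A B n hn (2^n + m), validC_add A B n m,
      shown_add_eq A B n m hm, shown_add_lt A B n (n-1) (by omega) m,
      Nat.testBit_two_pow_add_eq, Nat.testBit_eq_false_of_lt hm, Bool.not_false]
  rw [hfirst, hsecond]
  have t1 : ((false : Bool) == false) = true := rfl
  have t2 : ((true : Bool) == false) = false := rfl
  have t3 : ((false : Bool) == true) = false := rfl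
  have t4 : ((true : Bool) == true) = true := rfl
  cases b
  · simp only [t1, t2, Bool.and_true, Bool.and_false, List.filter_false,
      List.length_nil, Nat.add_zero]
    rw [filter_split (fun m => validC A B n m && !(shown A B m (n-1) == A.getD n 0))
      (fun m => m.testBit (n-1)) (List.range (2^n))]
    rw [sub_count A B n (A.getD n 0) false, sub_count A B n (A.getD n 0) true]
    simp
  · simp only [t3, t4, Bool.and_true, Bool.and_false, List.filter_false,
      List.length_nil, Nat.zero_add]
    rw [filter_split (fun m => validC A B n m && !(shown A B m (n-1) == B.getD n 0))
      (fun m => m.testBit (n-1)) (List.range (2^n))]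
    rw [sub_count A B n (B.getD n 0) false, sub_count A B n (B.getD n 0) true]
    simp

theorem cnt_one (A B : List Int) (b : Bool) : cnt A B b 1 = 1 := by
  have h2 : (2:Nat)^1 = 2 := rfl
  have hr : List.range 2 = [0, 1] := rfl
  have hv : ∀ m, validC A B 1 m = true := by intro m; rfl
  cases b <;> simp [cnt, h2, hr, List.filter, hv, Nat.testBit]

theorem dp_invariant (A B : List Int) : ∀ (k : Nat),
    ((List.range' 1 k).foldl (fun (s : Int × Int) i =>
      ((if A.getD i 0 ≠ A.getD (i-1) 0 then s.1 else 0) +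
         (if A.getD i 0 ≠ B.getD (i-1) 0 then s.2 else 0),
       (if B.getD i 0 ≠ A.getD (i-1) 0 then s.1 else 0) +
         (if B.getD i 0 ≠ B.getD (i-1) 0 then s.2 else 0))) (1, 1))
      = ((cnt A B false (k+1) : Int), (cnt A B true (k+1) : Int)) := by
  intro k
  induction k with
  | zero => simp [cnt_one]
  | succ k ih =>
    rw [List.range'_concat, List.foldl_append, ih]
    simp only [List.foldl_cons, List.foldl_nil]
    have e1 : 1 + 1 * k = k + 1 := by omega
    rw [e1]
    rw [cnt_succ A B (k+1) (by omega) false, cnt_succ A B (k+1) (by omega) true]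
    simp only [Nat.add_sub_cancel]
    rw [Prod.mk.injEq]
    constructor <;>
      simp [apply_ite (fun n : Nat => (n : Int)), ite_not]

-- ===== VERDICT (by name: the statement is the Claim_ definition above) =====
theorem count_valid_flips_spec : Claim_unchanged_count_valid_flips := by
  intro N A B _ hPre hD
  have hD' : N ≠ 1 := hD
  obtain ⟨hN0, -, -⟩ := hPre
  by_cases h0 : N = 0
  · subst h0
    norm_num [count_valid_flips, count_valid_flips_alt, aBody, List.range_one]
  · have hn2 : 2 ≤ N.toNat := by omega
    set n := N.toNat with hn
    unfold count_valid_flips count_valid_flips_alt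
    rw [if_neg hD', if_neg h0]
    have hfe : aBody N A B = (fun vc mask => if validC A B n mask then (vc + 1) % 998244353 else vc) := by
      funext vc mask
      unfold aBody
      rw [← hn]
      simp only [all_aPairOk_eq, if_pos (show (1:Int) < N by omega)]
      cases hv : validC A B n mask
      · simp
      · simp [aLastOk_of_validC n hn2 A B mask hv]
    rw [hfe]
    have hc := foldl_count (validC A B n) (List.range (2^n)) 0
    rw [show ((0:Int) % 998244353) = 0 from rfl] at hc
    rw [hc]
    rw [filter_split (validC A B n) (fun m => m.testBit (n-1)) (List.range (2^n))]
    have hdp := dp_invariant A B (n-1)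
    rw [show n - 1 + 1 = n from by omega] at hdp
    rw [hdp]
    show (0 + ((cnt A B false n + cnt A B true n : Nat) : Int)) % 998244353
      = (((cnt A B false n : Int)) + ((cnt A B true n : Int))) % 998244353
    push_cast
    ring_nf

theorem count_valid_flips_changed : Claim_changed_count_valid_flips := by
  unfold Claim_changed_count_valid_flips; decide

theorem count_valid_flips_tight : Claim_exact_count_valid_flips := by
  intro N A B _ hPre hD
  have h1 : N = 1 := hD
  subst h1
  have halt : count_valid_flips_alt 1 A B = 2 := rfl
  rw [halt]
  unfold count_valid_flips
  rw [if_pos rfl]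
  split <;> norm_num
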